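-- pv_equiv track=rewrite | github.com/nhdewitt/codewars-kata | Python/6 kyu/upside_down_numbers.py | upside_down
-- ===== SOURCE A (Python) =====
-- def upside_down(n):
--     if n < 10:
--         return n in (0, 1, 8)
--     parsed = str(n)
--     if parsed[-1] == "0":
--         return False
--
--     upside_down_map = {
--     "0": "0",
--     "1": "1",
--     "8": "8",
--     "6": "9",
--     "9": "6",
--     }
--
--     p, q = 0, len(parsed) - 1
--     while p <= q:
--         if upside_down_map.get(parsed[p]) != parsed[q]:
--             return False
--         p += 1
--         q -= 1
--     return True
-- ===== SOURCE B (Python) =====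
-- def upside_down(n):
--     table = {"0": "0", "1": "1", "8": "8", "6": "9", "9": "6"}
--     s = str(n)
--     rotated = []
--     for c in reversed(s):
--         if c not in table:
--             return False
--         rotated.append(table[c])
--     return "".join(rotated) == s
-- ===== Notes on version B (the rewrite author's own statement) =====
-- stated objective: simpler
-- what changed: A's single-digit special case, trailing-zero guard and in-place two-pointer scan are replaced by one pass that maps the reversed digit string through the strobogrammatic table (failing on any unmapped character, including '-' and 6/9 singletons) and compares the rotated string with the original.
import Mathlib
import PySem

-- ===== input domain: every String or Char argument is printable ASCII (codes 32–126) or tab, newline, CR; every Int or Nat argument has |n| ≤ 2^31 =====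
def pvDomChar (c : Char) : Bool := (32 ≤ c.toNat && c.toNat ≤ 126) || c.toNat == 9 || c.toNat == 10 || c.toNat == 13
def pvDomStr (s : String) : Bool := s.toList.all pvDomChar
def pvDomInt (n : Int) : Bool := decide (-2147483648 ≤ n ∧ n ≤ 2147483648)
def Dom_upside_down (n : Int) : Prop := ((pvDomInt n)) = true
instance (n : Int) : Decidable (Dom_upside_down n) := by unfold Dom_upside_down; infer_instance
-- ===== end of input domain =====

-- B replaces A's single-digit special case, trailing-zero guard and two-pointer scan by one pass:
-- map the reversed digits through the table and compare the rotated string with the original ("simpler").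

-- ===== PORT A =====
-- the strobogrammatic table (the identical dict literal appears in A's and in B's Python)
def udMap : PySem.Dict Char Char :=
  PySem.Dict.ofList [('0', '0'), ('1', '1'), ('8', '8'), ('6', '9'), ('9', '6')]

-- A's while loop: `while p <= q: if map.get(parsed[p]) != parsed[q]: return False; p += 1; q -= 1`
-- (the `none` index branches are unreachable for A's calls, where 0 ≤ p ≤ q < len: Python never raises here)
def aLoop (s : List Char) (p q : Int) : Bool :=
  if _h : p ≤ q then
    match PySem.List.pyGet? s p, PySem.List.pyGet? s q with
    | some cp, some cq =>
      if udMap.get? cp = some cq then aLoop s (p + 1) (q - 1) else false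
    | _, _ => false
  else true
termination_by (q + 1 - p).toNat
decreasing_by omega

def upside_down (n : Int) : Bool :=
  if n < 10 then (n == 0 || n == 1 || n == 8)
  else
    let parsed := PySem.Int.toChars n
    if PySem.List.pyGet? parsed (-1) = some '0' then false
    else aLoop parsed 0 ((parsed.length : Int) - 1)

-- ===== PORT B =====
-- B's loop: `for c in reversed(s): if c not in table: return False; rotated.append(table[c])`
-- (Option-valued: `none` is B's early `return False`)
def rotateChars : List Char → Option (List Char)
  | [] => some []
  | c :: rest =>
    match udMap.get? c with
    | none => none
    | some d =>
      match rotateChars rest with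
      | none => none
      | some ds => some (d :: ds)

def upside_down_alt (n : Int) : Bool :=
  let s := PySem.Int.toChars n
  match rotateChars s.reverse with
  | none => false
  | some r => r == s

-- ===== PRECONDITION & SPEC =====
def Spec_upside_down (n : Int) (out : Bool) : Prop := out = upside_down_alt n
instance (n : Int) (out : Bool) : Decidable (Spec_upside_down n out) := by unfold Spec_upside_down; infer_instance

-- ===== CLAIM (what is proved, stated in full; the proofs are below) =====
def Claim_equal_upside_down : Prop := ∀ (n : Int), Dom_upside_down n → Spec_upside_down n (upside_down n)

-- ===== LEMMAS AND PROOFS =====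

-- indexing glue: a Python subscript with a nonnegative in-range index is a plain list lookup
theorem pyGet?_some (s : List Char) (i : Int) (h0 : 0 ≤ i) (h1 : i.toNat < s.length) :
    PySem.List.pyGet? s i = some (s[i.toNat]'h1) := by
  rw [PySem.List.pyGet?_eq_some_getElem s h0 (by omega)]

-- the table as a chain of ifs
theorem udGet_eq (c : Char) :
    udMap.get? c =
      if c = '0' then some '0' else if c = '1' then some '1' else if c = '8' then some '8'
      else if c = '6' then some '9' else if c = '9' then some '6' else none := by
  have h : udMap = PySem.Dict.mk [('0', '0'), ('1', '1'), ('8', '8'), ('6', '9'), ('9', '6')] := by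
    decide
  by_cases h0 : c = '0'; · subst h0; decide
  by_cases h1 : c = '1'; · subst h1; decide
  by_cases h8 : c = '8'; · subst h8; decide
  by_cases h6 : c = '6'; · subst h6; decide
  by_cases h9 : c = '9'; · subst h9; decide
  simp only [h, PySem.Dict.get?_mk_cons, beq_iff_eq,
    if_neg (Ne.symm h0), if_neg (Ne.symm h1), if_neg (Ne.symm h8), if_neg (Ne.symm h6),
    if_neg (Ne.symm h9), if_neg h0, if_neg h1, if_neg h8, if_neg h6, if_neg h9]
  rfl

-- the table is an involution: a maps to b iff b maps to a
theorem udGet_symm {a b : Char} (h : udMap.get? a = some b) : udMap.get? b = some a := by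
  rw [udGet_eq] at h
  split_ifs at h <;> subst_vars <;> injection h with hb <;> subst hb <;> decide

-- B's loop succeeds exactly on pointwise-mapped lists
theorem rotateChars_eq_some_iff (cs : List Char) : ∀ r : List Char,
    (rotateChars cs = some r ↔ List.Forall₂ (fun c d => udMap.get? c = some d) cs r) := by
  induction cs with
  | nil =>
    intro r
    simp only [rotateChars, Option.some.injEq, List.forall₂_nil_left_iff]
    exact ⟨fun h => h.symm, fun h => h.symm⟩
  | cons c rest ih =>
    intro r
    cases hg : udMap.get? c with
    | none =>
      simp only [rotateChars, hg]
      constructor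
      · intro h; simp at h
      · rintro (_ | ⟨hcd, -⟩); rw [hg] at hcd; simp at hcd
    | some d =>
      cases hr : rotateChars rest with
      | none =>
        simp only [rotateChars, hg, hr]
        constructor
        · intro h; simp at h
        · rintro (_ | ⟨-, htl⟩)
          have h2 := (ih _).mpr htl
          rw [hr] at h2
          simp at h2
      | some ds =>
        simp only [rotateChars, hg, hr, Option.some.injEq]
        constructor
        · rintro rfl
          exact List.Forall₂.cons hg ((ih ds).mp hr)
        · rintro (_ | ⟨hcd, htl⟩)
          rw [hg] at hcd
          have h2 := (ih _).mpr htl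
          rw [hr] at h2
          rw [Option.some.inj hcd, Option.some.inj h2]

-- B's loop fails as soon as an unmapped character occurs anywhere
theorem rotateChars_none_of_mem {c : Char} {cs : List Char}
    (hm : c ∈ cs) (hn : udMap.get? c = none) : rotateChars cs = none := by
  induction cs with
  | nil => cases hm
  | cons a rest ih =>
    rcases List.mem_cons.mp hm with rfl | hmem
    · simp [rotateChars, hn]
    · cases hg : udMap.get? a with
      | none => simp [rotateChars, hg]
      | some d => simp [rotateChars, hg, ih hmem]

-- the pointwise condition A's two-pointer loop decides, in A's own option form
def PairsOk (s : List Char) (p q : Int) : Prop :=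
  ∀ i : Int, p ≤ i → i ≤ q →
    (PySem.List.pyGet? s i).bind udMap.get? = PySem.List.pyGet? s ((s.length : Int) - 1 - i)

-- two-pointer loop invariant
theorem aLoop_iff_aux (s : List Char) : ∀ k : Nat, ∀ p q : Int, (q + 1 - p).toNat = k →
    0 ≤ p → p + q = (s.length : Int) - 1 →
    (aLoop s p q = true ↔ PairsOk s p q) := by
  intro k
  induction k using Nat.strong_induction_on with
  | _ k ih =>
    intro p q hk hp hpq
    rw [aLoop]
    by_cases hle : p ≤ q
    · have hq0 : 0 ≤ q := le_trans hp hle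
      rw [dif_pos hle,
          pyGet?_some s p hp (by omega),
          pyGet?_some s q hq0 (by omega)]
      dsimp only
      split_ifs with hR
      · rw [ih ((q - 1) + 1 - (p + 1)).toNat (by omega) (p + 1) (q - 1) rfl (by omega) (by omega)]
        constructor
        · intro hP i hi1 hi2
          by_cases hip : i = p
          · subst hip
            rw [pyGet?_some s i hp (by omega),
                pyGet?_some s ((s.length : Int) - 1 - i) (by omega) (by omega)]
            have hidx : ((s.length : Int) - 1 - i).toNat = q.toNat := by omega
            simp only [hidx]
            exact hR
          · by_cases hiq : i = q
            · subst hiq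
              rw [pyGet?_some s i hq0 (by omega),
                  pyGet?_some s ((s.length : Int) - 1 - i) (by omega) (by omega)]
              have hidx : ((s.length : Int) - 1 - i).toNat = p.toNat := by omega
              simp only [hidx]
              exact udGet_symm hR
            · exact hP i (by omega) (by omega)
        · intro hP i hi1 hi2
          exact hP i (by omega) (by omega)
      · constructor
        · intro h; exact h.elim
        · intro hP
          exfalso
          have hcon := hP p le_rfl hle
          rw [pyGet?_some s p hp (by omega),
              pyGet?_some s ((s.length : Int) - 1 - p) (by omega) (by omega)] at hcon
          have hidx : ((s.length : Int) - 1 - p).toNat = q.toNat := by omega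
          simp only [hidx] at hcon
          exact hR hcon
    · rw [dif_neg hle]
      constructor
      · intro _ i hi1 hi2; omega
      · intro _; rfl

-- decimal digits of a natural number, most significant first (= Nat.toDigits 10)
def digs (n : Nat) : List Char :=
  if n < 10 then [Nat.digitChar n]
  else digs (n / 10) ++ [Nat.digitChar (n % 10)]
decreasing_by exact Nat.div_lt_self (by omega) (by omega)

theorem toDigitsCore_eq_digs : ∀ f n : Nat, n < f → ∀ l, Nat.toDigitsCore 10 f n l = digs n ++ l := by
  intro f
  induction f with
  | zero => intro n h; omega
  | succ f ihf =>
    intro n h l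
    simp only [Nat.toDigitsCore]
    by_cases h10 : n / 10 = 0
    · rw [if_pos h10]
      conv_rhs => rw [digs]
      rw [if_pos (by omega : n < 10), Nat.mod_eq_of_lt (by omega)]
      rfl
    · rw [if_neg h10, ihf (n / 10) (by omega) _]
      have hge : ¬ n < 10 := by omega
      conv_rhs => rw [digs, if_neg hge, List.append_assoc]
      rfl

theorem toDigits_eq_digs (n : Nat) : Nat.toDigits 10 n = digs n := by
  have := toDigitsCore_eq_digs (n + 1) n (by omega) []
  simpa [Nat.toDigits] using this

theorem digs_ne_nil (n : Nat) : digs n ≠ [] := by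
  rw [digs]
  split
  · simp
  · simp

theorem digs_head_ne_zero : ∀ n : Nat, 1 ≤ n → ∀ c, (digs n).head? = some c → c ≠ '0' := by
  intro n
  induction n using Nat.strong_induction_on with
  | _ n ih =>
    intro h1 c hc
    rw [digs] at hc
    by_cases hn10 : n < 10
    · rw [if_pos hn10] at hc
      simp only [List.head?_cons, Option.some.injEq] at hc
      subst hc
      interval_cases n <;> decide
    · rw [if_neg hn10] at hc
      obtain ⟨a, t, hat⟩ := List.exists_cons_of_ne_nil (digs_ne_nil (n / 10))
      rw [hat] at hc
      simp only [List.cons_append, List.head?_cons, Option.some.injEq] at hc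
      have hih := ih (n / 10) (Nat.div_lt_self (by omega) (by omega)) (by omega) a
        (by rw [hat]; rfl)
      rw [← hc]
      exact hih

-- ===== VERDICT (by name: the statement is the Claim_ definition above) =====
theorem upside_down_spec : Claim_equal_upside_down := by
  intro n _
  unfold Spec_upside_down
  by_cases hneg : n < 0
  · -- negative n: A's n < 10 branch returns False; B fails on the '-' sign
    have hA : upside_down n = false := by
      rw [upside_down, if_pos (by omega : n < 10)]
      simp only [Bool.or_eq_false_iff, beq_eq_false_iff_ne]
      omega
    have hs : PySem.Int.toChars n = '-' :: Nat.toDigits 10 n.natAbs := by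
      simp [PySem.Int.toChars, hneg]
    have hB : upside_down_alt n = false := by
      rw [upside_down_alt]
      simp only [hs]
      rw [rotateChars_none_of_mem (c := '-') (by simp) (by decide)]
    rw [hA, hB]
  · by_cases hlt : n < 10
    · -- single digits 0..9: both sides compute
      have h0 : 0 ≤ n := by omega
      interval_cases n <;> decide
    · -- n ≥ 10
      have hs : PySem.Int.toChars n = digs n.toNat := by
        rw [PySem.Int.toChars]
        rw [if_neg hneg, toDigits_eq_digs]
      set s : List Char := digs n.toNat with hsdef
      have hne : s ≠ [] := digs_ne_nil _
      have hlen : 1 ≤ s.length := List.length_pos_iff.mpr hne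
      have hhead : ∀ c, s.head? = some c → c ≠ '0' := digs_head_ne_zero _ (by omega)
      have hA : upside_down n =
          (if PySem.List.pyGet? s (-1) = some '0' then false
           else aLoop s 0 ((s.length : Int) - 1)) := by
        rw [upside_down, if_neg (by omega : ¬ n < 10)]
        simp only [hs]
      have hB : upside_down_alt n =
          (match rotateChars s.reverse with
           | none => false
           | some r => r == s) := by
        rw [upside_down_alt]
        simp only [hs]
      rw [hA, hB]
      have hBs : (match rotateChars s.reverse with
           | none => false
           | some r => r == s) = true ↔ rotateChars s.reverse = some s := by
        cases hr : rotateChars s.reverse with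
        | none => simp
        | some r => simp [beq_iff_eq]
      have hForall : rotateChars s.reverse = some s ↔
          ∀ i (h : i < s.length), udMap.get? (s[s.length - 1 - i]'(by omega)) = some (s[i]'h) := by
        rw [rotateChars_eq_some_iff, List.forall₂_iff_get]
        constructor
        · intro hg i hi
          have := hg.2 i (by simpa using hi) hi
          simpa [List.get_eq_getElem, List.getElem_reverse] using this
        · intro hg
          refine ⟨by simp, fun i h1 h2 => ?_⟩
          have := hg i h2
          simpa [List.get_eq_getElem, List.getElem_reverse] using this
      by_cases hz : PySem.List.pyGet? s (-1) = some '0'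
      · -- trailing zero: A returns False immediately; B's rotated string starts with '0'
        rw [if_pos hz]
        have hlast : s.getLast? = some '0' := by
          rw [← PySem.List.pyGet?_neg_one]; exact hz
        have hnots : rotateChars s.reverse ≠ some s := by
          intro hsome
          have h0 := (hForall.mp hsome) 0 (by omega)
          have hlast' : s[s.length - 1 - 0]'(by omega) = '0' := by
            have hg := List.getLast?_eq_getElem? (l := s)
            rw [hlast] at hg
            have h1 : s[s.length - 1]? = some '0' := hg.symm
            simpa using (List.getElem?_eq_some_iff.mp h1).2
          rw [hlast'] at h0
          rw [udGet_eq] at h0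
          have hh : s.head? = some (s[0]'(by omega)) := by
            rw [List.head?_eq_getElem?]
            simp
          exact hhead _ hh (Option.some.inj h0).symm
        cases hr : rotateChars s.reverse with
        | none => rfl
        | some r =>
          have hrs : r ≠ s := fun h => hnots (by rw [hr, h])
          simp [hrs]
      · rw [if_neg hz]
        have hAiff := aLoop_iff_aux s ((((s.length : Int) - 1) + 1 - 0).toNat) 0 ((s.length : Int) - 1)
          rfl le_rfl (by omega)
        have hPiff : PairsOk s 0 ((s.length : Int) - 1) ↔
            ∀ i (h : i < s.length), udMap.get? (s[i]'h) = some (s[s.length - 1 - i]'(by omega)) := by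
          constructor
          · intro hP i hi
            have hcon := hP (i : Int) (by omega) (by omega)
            rw [pyGet?_some s (i : Int) (by omega) (by omega),
                pyGet?_some s ((s.length : Int) - 1 - (i : Int)) (by omega) (by omega)] at hcon
            have h1 : ((i : Int)).toNat = i := by omega
            have h2 : ((s.length : Int) - 1 - (i : Int)).toNat = s.length - 1 - i := by omega
            simp only [h1, h2] at hcon
            exact hcon
          · intro hg i hi1 hi2
            rw [pyGet?_some s i (by omega) (by omega),
                pyGet?_some s ((s.length : Int) - 1 - i) (by omega) (by omega)]
            have h2 : ((s.length : Int) - 1 - i).toNat = s.length - 1 - i.toNat := by omega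
            simp only [h2]
            exact hg i.toNat (by omega)
        have hflip : (∀ i (h : i < s.length),
              udMap.get? (s[i]'h) = some (s[s.length - 1 - i]'(by omega))) ↔
            (∀ i (h : i < s.length),
              udMap.get? (s[s.length - 1 - i]'(by omega)) = some (s[i]'h)) := by
          constructor
          · intro hg i hi
            have := hg (s.length - 1 - i) (by omega)
            have he : s.length - 1 - (s.length - 1 - i) = i := by omega
            simpa [he] using this
          · intro hg i hi
            have := hg (s.length - 1 - i) (by omega)
            have he : s.length - 1 - (s.length - 1 - i) = i := by omega
            simpa [he] using this
      -- assemble both characterisations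
        have hiff : aLoop s 0 ((s.length : Int) - 1) = true ↔
            (match rotateChars s.reverse with
             | none => false
             | some r => r == s) = true := by
          rw [hAiff, hBs, hForall, hPiff, hflip]
        cases hA' : aLoop s 0 ((s.length : Int) - 1) with
        | true => exact (hiff.mp hA').symm
        | false =>
          cases hB' : (match rotateChars s.reverse with
             | none => false
             | some r => r == s) with
          | false => rfl
          | true => rw [hiff.mpr hB'] at hA'; cases hA'
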